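-- pv_equiv track=rewrite | github.com/baltikaa9/numerical_methods_labs | lab4/sweep.py | _calc_coeffs
-- ===== SOURCE A (Python) =====
-- def _calc_coeffs(matrix) -> tuple[list, list, list]:
--     a, b, c = [], [], []
--     for i, row in enumerate(matrix):
--         for j, column in enumerate(row):
--             if i == j:
--                 b.append(column)
--             elif i == j - 1:
--                 c.append(column)
--             elif i == j + 1:
--                 a.append(column)
--     return a, b, c
-- ===== SOURCE B (Python) =====
-- def _calc_coeffs(matrix) -> tuple[list, list, list]:
--     a, b, c = [], [], []
--     for i, row in enumerate(matrix):
--         n = len(row)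
--         if 1 <= i and i - 1 < n:
--             a.append(row[i - 1])
--         if i < n:
--             b.append(row[i])
--         if i + 1 < n:
--             c.append(row[i + 1])
--     return a, b, c
-- ===== Notes on version B (the rewrite author's own statement) =====
-- stated objective: faster
-- what changed: Instead of scanning every entry of every row and testing its column index, B indexes the sub-/main-/super-diagonal entry of each row directly, one O(1) step per row.
import Mathlib
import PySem

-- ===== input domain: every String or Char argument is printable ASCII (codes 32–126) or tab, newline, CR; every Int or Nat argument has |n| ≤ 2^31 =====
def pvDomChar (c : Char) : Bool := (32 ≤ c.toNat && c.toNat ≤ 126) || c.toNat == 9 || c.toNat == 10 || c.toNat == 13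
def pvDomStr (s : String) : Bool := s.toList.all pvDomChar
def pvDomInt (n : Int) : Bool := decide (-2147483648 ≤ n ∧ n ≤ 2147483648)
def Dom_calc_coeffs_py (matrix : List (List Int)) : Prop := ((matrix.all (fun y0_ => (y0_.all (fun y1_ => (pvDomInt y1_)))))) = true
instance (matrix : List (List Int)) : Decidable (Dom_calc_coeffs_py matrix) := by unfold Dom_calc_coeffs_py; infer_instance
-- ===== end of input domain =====

-- B replaces A's full scan of every row (testing each column index) by direct
-- indexing of the three diagonal entries of each row: one O(1) step per row.


-- ===== PORT A =====
-- inner 'for j, column in enumerate(row)' loop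
def pvInnerA (i j : Nat) (row : List Int) (acc : List Int × List Int × List Int) :
    List Int × List Int × List Int :=
  match row with
  | [] => acc
  | col :: rest =>
    let (a, b, c) := acc
    let acc' :=
      if i = j then (a, b ++ [col], c)
      else if i + 1 = j then (a, b, c ++ [col])   -- Python: i == j - 1
      else if i = j + 1 then (a ++ [col], b, c)
      else (a, b, c)
    pvInnerA i (j + 1) rest acc'

-- outer 'for i, row in enumerate(matrix)' loop
def pvGoA (i : Nat) (m : List (List Int)) (acc : List Int × List Int × List Int) :
    List Int × List Int × List Int :=
  match m with
  | [] => acc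
  | row :: rest => pvGoA (i + 1) rest (pvInnerA i 0 row acc)

def calc_coeffs_py (matrix : List (List Int)) : List Int × List Int × List Int :=
  pvGoA 0 matrix ([], [], [])

-- ===== PORT B =====
-- one O(1) step per row: index the sub-/main-/super-diagonal entry directly
def pvGoB (i : Nat) (m : List (List Int)) (acc : List Int × List Int × List Int) :
    List Int × List Int × List Int :=
  match m with
  | [] => acc
  | row :: rest =>
    let (a, b, c) := acc
    let n := row.length
    let a' := if 1 ≤ i ∧ i - 1 < n then a ++ [row.getD (i - 1) 0] else a
    let b' := if i < n then b ++ [row.getD i 0] else b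
    let c' := if i + 1 < n then c ++ [row.getD (i + 1) 0] else c
    pvGoB (i + 1) rest (a', b', c')

def calc_coeffs_py_alt (matrix : List (List Int)) : List Int × List Int × List Int :=
  pvGoB 0 matrix ([], [], [])

-- ===== PRECONDITION & SPEC =====
def Spec_calc_coeffs_py (matrix : List (List Int)) (out : List Int × List Int × List Int) : Prop := out = calc_coeffs_py_alt matrix
instance (matrix : List (List Int)) (out : List Int × List Int × List Int) : Decidable (Spec_calc_coeffs_py matrix out) := by unfold Spec_calc_coeffs_py; infer_instance

-- ===== CLAIM (what is proved, stated in full; the proofs are below) =====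
def Claim_equal_calc_coeffs_py : Prop := ∀ (matrix : List (List Int)), Dom_calc_coeffs_py matrix → Spec_calc_coeffs_py matrix (calc_coeffs_py matrix)

-- ===== LEMMAS AND PROOFS =====

-- characterization of A's inner row scan: relative to start index j it appends
-- at most one element (the sub-/main-/super-diagonal entry) to each of a, b, c
theorem pvInnerA_eq (i : Nat) : ∀ (j : Nat) (row a b c : List Int),
    pvInnerA i j row (a, b, c) =
      (a ++ (if j < i ∧ i - 1 - j < row.length then [row.getD (i - 1 - j) 0] else []),
       b ++ (if j ≤ i ∧ i - j < row.length then [row.getD (i - j) 0] else []),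
       c ++ (if j ≤ i + 1 ∧ i + 1 - j < row.length then [row.getD (i + 1 - j) 0] else [])) := by
  intro j row
  induction row generalizing j with
  | nil => intro a b c; simp [pvInnerA]
  | cons col rest ih =>
    intro a b c
    simp only [pvInnerA, List.length_cons]
    rcases Nat.lt_trichotomy i j with h | h | h
    · by_cases hc : j = i + 1
      · subst hc
        rw [if_neg (by omega : ¬ i = i + 1), if_pos rfl, ih]
        simp only [show i + 1 - (i + 1) = 0 from by omega]
        simp only [List.getD_cons_zero]
        split_ifs <;> first | rfl | (exfalso; omega) | simp
      · rw [if_neg (by omega : ¬ i = j), if_neg (by omega : ¬ i + 1 = j),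
            if_neg (by omega : ¬ i = j + 1), ih]
        split_ifs <;> first | rfl | (exfalso; omega)
    · subst h
      rw [if_pos rfl, ih]
      simp only [show i - i = 0 from by omega, show i + 1 - i = 0 + 1 from by omega,
        show i + 1 - (i + 1) = 0 from by omega]
      simp only [List.getD_cons_succ, List.getD_cons_zero, Nat.zero_add]
      split_ifs <;> first | rfl | (exfalso; omega) | simp
    · by_cases ha : i = j + 1
      · subst ha
        rw [if_neg (by omega : ¬ j + 1 = j), if_neg (by omega : ¬ j + 1 + 1 = j),
            if_pos rfl, ih]
        simp only [show j + 1 - 1 - j = 0 from by omega, show j + 1 - j = 0 + 1 from by omega,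
          show j + 1 - (j + 1) = 0 from by omega, show j + 1 + 1 - j = 0 + 1 + 1 from by omega,
          show j + 1 + 1 - (j + 1) = 0 + 1 from by omega]
        simp only [List.getD_cons_succ, Nat.zero_add]
        split_ifs <;> first | rfl | (exfalso; omega) | simp
      · rw [if_neg (by omega : ¬ i = j), if_neg (by omega : ¬ i + 1 = j), if_neg ha, ih]
        simp only [show i - 1 - j = (i - 1 - (j + 1)) + 1 from by omega,
          show i - j = (i - (j + 1)) + 1 from by omega,
          show i + 1 - j = (i + 1 - (j + 1)) + 1 from by omega]
        simp only [List.getD_cons_succ]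
        split_ifs <;> first | rfl | (exfalso; omega)

-- the two row-by-row loops agree from any start index and accumulator
theorem pvGo_eq : ∀ (m : List (List Int)) (i : Nat) (acc : List Int × List Int × List Int),
    pvGoA i m acc = pvGoB i m acc := by
  intro m
  induction m with
  | nil => intro i acc; rfl
  | cons row rest ih =>
    intro i acc
    obtain ⟨a, b, c⟩ := acc
    simp only [pvGoA, pvGoB, ih]
    congr 1
    rw [pvInnerA_eq]
    simp only [Nat.sub_zero]
    split_ifs <;> first | rfl | (exfalso; omega) | simp

-- ===== VERDICT (by name: the statement is the Claim_ definition above) =====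
theorem calc_coeffs_py_spec : Claim_equal_calc_coeffs_py := by
  intro matrix _
  unfold Spec_calc_coeffs_py calc_coeffs_py calc_coeffs_py_alt
  exact pvGo_eq matrix 0 ([], [], [])
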